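-- pv_equiv track=rewrite | github.com/Y123CP/TransAGENT | Code-CodeTranslation/main_run_repair_testInputs.py | count_spaces_before_substring
-- ===== SOURCE A (Python) =====
-- def count_spaces_before_substring(str1, sub_str1):
--     start_index = str1.find(sub_str1)
--     if start_index == -1:
--         return -1
--     count = 0
--     for i in range(start_index - 1, -1, -1):
--         if str1[i] == ' ':
--             count += 1
--         else:
--             break
--     return count
-- ===== SOURCE B (Python) =====
-- def count_spaces_before_substring(str1, sub_str1):
--     start_index = str1.find(sub_str1)
--     if start_index == -1:
--         return -1
--     prefix = str1[:start_index]
--     return len(prefix) - len(prefix.rstrip(' '))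
-- ===== Notes on version B (the rewrite author's own statement) =====
-- stated objective: simpler
-- what changed: Replaces the backward character-by-character counting loop with slicing the prefix and measuring how many trailing ASCII spaces rstrip(' ') removes (len(prefix) - len(prefix.rstrip(' '))).
import Mathlib
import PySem

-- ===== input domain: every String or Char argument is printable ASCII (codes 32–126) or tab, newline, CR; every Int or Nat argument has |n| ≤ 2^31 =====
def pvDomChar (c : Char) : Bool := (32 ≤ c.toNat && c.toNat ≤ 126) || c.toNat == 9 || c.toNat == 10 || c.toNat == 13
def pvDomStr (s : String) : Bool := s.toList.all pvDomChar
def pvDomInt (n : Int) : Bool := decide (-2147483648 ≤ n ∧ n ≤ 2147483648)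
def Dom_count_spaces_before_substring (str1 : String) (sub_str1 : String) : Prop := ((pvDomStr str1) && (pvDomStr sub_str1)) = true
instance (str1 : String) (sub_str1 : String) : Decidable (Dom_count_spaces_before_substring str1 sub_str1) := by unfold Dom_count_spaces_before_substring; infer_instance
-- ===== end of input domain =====

-- B replaces A's backward counting loop by slicing the prefix before the match and
-- measuring how many trailing ASCII spaces rstrip(' ') removes; same cost, simpler shape.

-- ===== PORT A =====
-- the 'for i in range(start_index-1, -1, -1)' loop with its break;
-- the indices produced by pyRange are always in range, so the `.getD ' '` default
-- for an out-of-range pyGet? is never taken (A raises nowhere)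
def csbsLoop (s : List Char) : List Int → Int → Int
  | [], count => count
  | i :: rest, count =>
    if (PySem.List.pyGet? s i).getD ' ' = ' ' then csbsLoop s rest (count + 1)
    else count

def count_spaces_before_substring (str1 : String) (sub_str1 : String) : Int :=
  let start_index := PySem.Str.find str1 sub_str1
  if start_index = -1 then -1
  else csbsLoop str1.toList (PySem.List.pyRange (start_index - 1) (-1) (-1)) 0

-- ===== PORT B =====
-- prefix.rstrip(' ') ported by hand (no PySem one-sided strip with a chars argument):
-- drop the leading run of ' ' from the reversed list and reverse back; exact for rstrip(' ')
def rstripSpaces (cs : List Char) : List Char :=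
  (cs.reverse.dropWhile (· == ' ')).reverse

def count_spaces_before_substring_alt (str1 : String) (sub_str1 : String) : Int :=
  let start_index := PySem.Str.find str1 sub_str1
  if start_index = -1 then -1
  else
    let pre := PySem.Chars.slice str1.toList none (some start_index)
    (pre.length : Int) - ((rstripSpaces pre).length : Int)

-- ===== PRECONDITION & SPEC =====
def Spec_count_spaces_before_substring (str1 : String) (sub_str1 : String) (out : Int) : Prop := out = count_spaces_before_substring_alt str1 sub_str1
instance (str1 : String) (sub_str1 : String) (out : Int) : Decidable (Spec_count_spaces_before_substring str1 sub_str1 out) := by unfold Spec_count_spaces_before_substring; infer_instance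

-- ===== CLAIM (what is proved, stated in full; the proofs are below) =====
def Claim_equal_count_spaces_before_substring : Prop := ∀ (str1 : String) (sub_str1 : String), Dom_count_spaces_before_substring str1 sub_str1 → Spec_count_spaces_before_substring str1 sub_str1 (count_spaces_before_substring str1 sub_str1)

-- ===== LEMMAS AND PROOFS =====

-- range(n-1, -1, -1) is [n-1, n-2, …, 0]
theorem pyRange_down (n : Nat) :
    PySem.List.pyRange ((n : Int) - 1) (-1) (-1) =
      (List.range n).map (fun (k : Nat) => ((n : Int) - 1) - (k : Int)) := by
  simp only [PySem.List.pyRange]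
  rcases Nat.eq_zero_or_pos n with h | h
  · subst h; norm_num
  · have h1 : (-1 : Int) < (n : Int) - 1 := by omega
    rw [if_neg (by norm_num), if_neg (by norm_num), if_pos h1]
    have : (((n : Int) - 1 - -1 + - -1 - 1) / - -1).toNat = n := by
      norm_num
    rw [this]
    apply List.map_congr_left
    intro k _; ring

theorem range_down_succ (n : Nat) :
    (List.range (n + 1)).map (fun (k : Nat) => ((n + 1 : Nat) : Int) - 1 - (k : Int)) =
      (n : Int) :: (List.range n).map (fun (k : Nat) => ((n : Int) - 1) - (k : Int)) := by
  rw [List.range_succ_eq_map, List.map_cons, List.map_map]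
  rw [List.cons_eq_cons]
  refine ⟨by push_cast; ring, ?_⟩
  apply List.map_congr_left
  intro k _
  simp only [Function.comp, Nat.succ_eq_add_one]
  push_cast; ring

-- the loop counts the trailing spaces of s.take n
theorem csbsLoop_eq (s : List Char) (n : Nat) (hn : n ≤ s.length) (c : Int) :
    csbsLoop s ((List.range n).map (fun (k : Nat) => ((n : Int) - 1) - (k : Int))) c =
      c + (((s.take n).reverse.takeWhile (· == ' ')).length : Int) := by
  induction n generalizing c with
  | zero => simp [csbsLoop]
  | succ m ih =>
    have hm : m < s.length := by omega
    rw [range_down_succ, csbsLoop]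
    have hget : PySem.List.pyGet? s ((m : Nat) : Int) = some s[m] := by
      simp [hm]
    have htake : (s.take (m + 1)).reverse = s[m] :: (s.take m).reverse := by
      rw [List.take_add_one]
      simp [hm]
    rw [hget]
    by_cases hsp : s[m] = ' '
    · rw [if_pos (by simp [hsp]), ih (by omega)]
      rw [htake, List.takeWhile_cons, if_pos (by simp [hsp])]
      simp; omega
    · rw [if_neg (by simp [hsp])]
      rw [htake, List.takeWhile_cons, if_neg (by simp [hsp])]
      simp

-- len(p) - len(rstrip(p, ' ')) is the length of the trailing-space run
theorem rstrip_count (p : List Char) :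
    (p.length : Int) - ((rstripSpaces p).length : Int) =
      ((p.reverse.takeWhile (· == ' ')).length : Int) := by
  unfold rstripSpaces
  have h := congrArg List.length (List.takeWhile_append_dropWhile (p := (· == ' ')) (l := p.reverse))
  rw [List.length_append, List.length_reverse] at h
  rw [List.length_reverse]
  omega

-- ===== VERDICT (by name: the statement is the Claim_ definition above) =====
theorem count_spaces_before_substring_spec : Claim_equal_count_spaces_before_substring := by
  intro str1 sub_str1 _
  unfold Spec_count_spaces_before_substring count_spaces_before_substring count_spaces_before_substring_alt
  simp only [PySem.Str.find_eq, PySem.Chars.slice_eq_listSlice]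
  set f := PySem.Chars.find str1.toList sub_str1.toList with hf
  by_cases h : f = -1
  · simp [h]
  · rw [if_neg h, if_neg h]
    have h0 : 0 ≤ f := by
      have := PySem.Chars.neg_one_le_find str1.toList sub_str1.toList
      rw [← hf] at this; omega
    have hle : f ≤ str1.toList.length := by
      have := PySem.Chars.find_le_length str1.toList sub_str1.toList
      rw [← hf] at this; exact this
    obtain ⟨n, hn⟩ : ∃ n : Nat, f = (n : Int) := ⟨f.toNat, (Int.toNat_of_nonneg h0).symm⟩
    have hnle : n ≤ str1.toList.length := by omega
    rw [hn, pyRange_down, csbsLoop_eq str1.toList n hnle 0,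
        PySem.List.slice_to str1.toList (by omega : (0:Int) ≤ (n : Int)),
        rstrip_count]
    simp
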